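-- pv_equiv track=rewrite | github.com/joshanashakya/dissertation | workspace/dataset/java-python/GeeksForGeeks/1967/A/2.py | longest_gap
-- ===== SOURCE A (Python) =====
-- def longest_gap(N):
--
--     distance = 0
--     count = 0
--     first_1 = -1
--     last_1 = -1
--
--     # Compute the binary representation
--     while (N > 0):
--         count += 1
--
--         r = N & 1
--
--         if (r == 1):
--             if first_1 == -1:
--                 first_1 = count
--             else:
--                 first_1 = first_1
--
--             last_1 = count
--
--         N = N // 2
--
--     # if N is a power of 2
--     # then return -1
--     if (last_1 <= first_1):
--         return -1
--
--     # else find the distance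
--     # between the first position of 1
--     # and last position of 1
--     else:
--         distance = last_1 - first_1 - 1
--         return distance
-- ===== SOURCE B (Python) =====
-- def longest_gap(N):
--     # Closed-form: distance between the highest and lowest set-bit positions.
--     if N <= 0:
--         return -1
--     # N ^ (N - 1) is a mask of the trailing zeros plus the lowest set bit,
--     # so its bit length is the (1-based) position of the lowest set bit.
--     return N.bit_length() - (N ^ (N - 1)).bit_length() - 1
-- ===== Notes on version B (the rewrite author's own statement) =====
-- stated objective: simpler
-- what changed: Replaces the bit-by-bit scanning while loop with a closed-form expression: highest set-bit position via N.bit_length() minus lowest set-bit position via the bit length of N XOR (N-1), minus one; powers of two fall out of the same formula.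
import Mathlib
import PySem

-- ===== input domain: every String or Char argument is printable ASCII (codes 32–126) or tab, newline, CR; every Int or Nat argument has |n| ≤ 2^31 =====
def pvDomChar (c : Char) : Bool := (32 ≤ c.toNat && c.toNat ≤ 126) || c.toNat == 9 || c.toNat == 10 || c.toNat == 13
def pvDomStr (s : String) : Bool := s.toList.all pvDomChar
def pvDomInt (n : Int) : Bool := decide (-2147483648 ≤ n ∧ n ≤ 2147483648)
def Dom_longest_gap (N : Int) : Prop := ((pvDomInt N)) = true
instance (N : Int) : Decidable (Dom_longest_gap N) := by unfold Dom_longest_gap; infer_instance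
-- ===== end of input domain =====

-- B replaces A's bit-scanning while loop with a closed form over bit_length (objective: simpler).

-- ===== PORT A =====
-- A's while loop: state (count, first_1, last_1); returns (first_1, last_1) when N ≤ 0.
def longestGapLoop (N count first last : Int) : Int × Int :=
  if _h : N > 0 then
    let count := count + 1
    let r := PySem.Int.band N 1
    let fl := if r = 1 then ((if first = -1 then count else first), count) else (first, last)
    longestGapLoop (PySem.Int.floordiv N 2) count fl.1 fl.2
  else (first, last)
termination_by N.toNat
decreasing_by
  rw [PySem.Int.floordiv_eq_ediv_of_pos (by omega : (0:Int) < 2)]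
  omega

def longest_gap (N : Int) : Int :=
  let s := longestGapLoop N 0 (-1) (-1)
  if s.2 ≤ s.1 then -1 else s.2 - s.1 - 1

-- ===== PORT B =====
def longest_gap_alt (N : Int) : Int :=
  if N ≤ 0 then -1
  else (PySem.Int.bitLength N : Int) - (PySem.Int.bitLength (PySem.Int.bxor N (N - 1)) : Int) - 1

-- ===== PRECONDITION & SPEC =====
def Spec_longest_gap (N : Int) (out : Int) : Prop := out = longest_gap_alt N
instance (N : Int) (out : Int) : Decidable (Spec_longest_gap N out) := by unfold Spec_longest_gap; infer_instance

-- ===== CLAIM (what is proved, stated in full; the proofs are below) =====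
def Claim_equal_longest_gap : Prop := ∀ (N : Int), Dom_longest_gap N → Spec_longest_gap N (longest_gap N)

-- ===== LEMMAS AND PROOFS =====

-- Nat bit facts for the trailing-bit mask n ^^^ (n - 1)
theorem xor_succ_double (m : Nat) : (2*m+1) ^^^ (2*m) = 1 := by
  apply Nat.eq_of_testBit_eq
  intro k
  cases k with
  | zero => simp [Nat.testBit_zero]
  | succ k =>
    rw [Nat.testBit_xor, Nat.testBit_succ, Nat.testBit_succ,
        show (2*m+1)/2 = m by omega, show (2*m)/2 = m by omega]
    simp [Nat.testBit_succ]

theorem xor_double_pred (m : Nat) (h : 0 < m) : (2*m) ^^^ (2*m-1) = 2*(m ^^^ (m-1)) + 1 := by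
  apply Nat.eq_of_testBit_eq
  intro k
  cases k with
  | zero => simp [Nat.testBit_zero]; omega
  | succ k =>
    rw [Nat.testBit_xor, Nat.testBit_succ, Nat.testBit_succ, Nat.testBit_succ,
        show (2*m)/2 = m by omega, show (2*m-1)/2 = m-1 by omega,
        show (2*(m ^^^ (m-1))+1)/2 = m ^^^ (m-1) by omega, Nat.testBit_xor]

-- One unfolding of the loop at a positive Nat argument
theorem loop_step (m : Nat) (h : 0 < m) (c f l : Int) :
    longestGapLoop (m : Int) c f l =
      longestGapLoop ((m / 2 : Nat) : Int) (c + 1)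
        (if ((m % 2 : Nat) : Int) = 1 then (if f = -1 then c + 1 else f) else f)
        (if ((m % 2 : Nat) : Int) = 1 then c + 1 else l) := by
  rw [longestGapLoop]
  have hpos : (m : Int) > 0 := by exact_mod_cast h
  simp only [hpos, dif_pos]
  rw [show PySem.Int.band (m : Int) 1 = ((m &&& 1 : Nat) : Int) from by
        exact_mod_cast PySem.Int.band_natCast m 1,
      show PySem.Int.floordiv (m : Int) 2 = ((m / 2 : Nat) : Int) from by
        exact_mod_cast PySem.Int.floordiv_natCast m 2,
      Nat.and_one_is_mod]
  split <;> simp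

theorem loop_zero (c f l : Int) : longestGapLoop 0 c f l = (f, l) := by
  rw [longestGapLoop]; simp

-- After the first set bit is found (f ≥ 1), first stays f and last becomes c + bitLength m.
theorem loop_found (m : Nat) : ∀ c f l : Int, 1 ≤ f →
    longestGapLoop (m : Int) c f l =
      (f, if m = 0 then l else c + (PySem.Int.bitLength (m : Int) : Int)) := by
  induction m using Nat.strong_induction_on with
  | _ m ih =>
    intro c f l hf
    rcases Nat.eq_zero_or_pos m with hm | hm
    · subst hm; simpa using loop_zero c f l
    · rw [loop_step m hm, ih (m/2) (by omega) (c+1) _ _ (by split <;> omega),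
          PySem.Int.bitLength_natCast hm]
      have hf' : ¬ (f = -1) := by omega
      rcases Nat.eq_zero_or_pos (m/2) with h2 | h2
      · have hmod : m % 2 = 1 := by omega
        simp [h2, hmod, hf', show m ≠ 0 by omega, PySem.Int.bitLength_zero]
      · have : m % 2 = 0 ∨ m % 2 = 1 := by omega
        rcases this with hmod | hmod <;>
          simp [show m / 2 ≠ 0 by omega, hmod, hf', show m ≠ 0 by omega] <;> ring

-- Starting from the not-yet-found state, first becomes c + bitLength (m ^^^ (m-1)),
-- i.e. the position of the lowest set bit, and last becomes c + bitLength m.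
theorem loop_fresh (m : Nat) : 0 < m → ∀ c : Int, 0 ≤ c →
    longestGapLoop (m : Int) c (-1) (-1) =
      (c + (PySem.Int.bitLength ((m ^^^ (m-1) : Nat) : Int) : Int),
       c + (PySem.Int.bitLength (m : Int) : Int)) := by
  induction m using Nat.strong_induction_on with
  | _ m ih =>
    intro hm c hc0
    rw [loop_step m hm]
    have : m % 2 = 0 ∨ m % 2 = 1 := by omega
    rcases this with hmod | hmod
    · -- even: recurse in the fresh state
      have h2 : 0 < m / 2 := by omega
      rw [if_neg (by exact_mod_cast by omega : ¬ ((m % 2 : Nat) : Int) = 1),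
          if_neg (by exact_mod_cast by omega : ¬ ((m % 2 : Nat) : Int) = 1),
          ih (m/2) (by omega) h2 (c+1) (by omega), PySem.Int.bitLength_natCast hm]
      have hx : m ^^^ (m - 1) = 2 * ((m/2) ^^^ (m/2 - 1)) + 1 := by
        have := xor_double_pred (m/2) h2
        rw [show 2 * (m/2) = m by omega] at this
        rw [show m - 1 = 2*(m/2) - 1 by omega, show 2*(m/2) = m by omega] at this
        exact this
      rw [hx, PySem.Int.bitLength_natCast (m := 2 * ((m/2) ^^^ (m/2 - 1)) + 1) (by omega),
          show (2 * ((m/2) ^^^ (m/2 - 1)) + 1) / 2 = (m/2) ^^^ (m/2 - 1) by omega]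
      simp only [Prod.mk.injEq]
      constructor <;> (push_cast; ring)
    · -- odd: the lowest set bit is found here
      have hc : ((m % 2 : Nat) : Int) = 1 := by exact_mod_cast hmod
      simp only [hc, if_true]
      rw [loop_found (m/2) (c+1) (c+1) (c+1) (by omega),
          PySem.Int.bitLength_natCast hm]
      have hx : m ^^^ (m - 1) = 1 := by
        have := xor_succ_double (m/2)
        rw [show 2*(m/2)+1 = m by omega, show 2*(m/2) = m - 1 by omega] at this
        exact this
      rw [hx]
      have hb1 : PySem.Int.bitLength ((1 : Nat) : Int) = 1 := by decide
      rcases Nat.eq_zero_or_pos (m/2) with h2 | h2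
      · rw [if_pos h2, h2, hb1, show PySem.Int.bitLength ((0:Nat):Int) = 0 from by decide]
        simp only [Prod.mk.injEq]
        omega
      · rw [if_neg (by omega), hb1]
        simp only [Prod.mk.injEq]
        omega

-- bitLength of the trailing mask never exceeds bitLength of m
theorem bitLength_mask_le (m : Nat) : 0 < m →
    PySem.Int.bitLength ((m ^^^ (m-1) : Nat) : Int) ≤ PySem.Int.bitLength (m : Int) := by
  induction m using Nat.strong_induction_on with
  | _ m ih =>
    intro hm
    have : m % 2 = 0 ∨ m % 2 = 1 := by omega
    rcases this with hmod | hmod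
    · have h2 : 0 < m / 2 := by omega
      have hx : m ^^^ (m - 1) = 2 * ((m/2) ^^^ (m/2 - 1)) + 1 := by
        have := xor_double_pred (m/2) h2
        rw [show 2 * (m/2) = m by omega] at this
        rw [show m - 1 = 2*(m/2) - 1 by omega, show 2*(m/2) = m by omega] at this
        exact this
      rw [hx, PySem.Int.bitLength_natCast (m := 2 * ((m/2) ^^^ (m/2 - 1)) + 1) (by omega),
          show (2 * ((m/2) ^^^ (m/2 - 1)) + 1) / 2 = (m/2) ^^^ (m/2 - 1) by omega,
          PySem.Int.bitLength_natCast hm]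
      exact Nat.add_le_add_right (ih (m/2) (by omega) h2) 1
    · have hx : m ^^^ (m - 1) = 1 := by
        have := xor_succ_double (m/2)
        rw [show 2*(m/2)+1 = m by omega, show 2*(m/2) = m - 1 by omega] at this
        exact this
      rw [hx, PySem.Int.bitLength_natCast hm]
      have : PySem.Int.bitLength ((1:Nat):Int) = 1 := by decide
      omega

-- ===== VERDICT (by name: the statement is the Claim_ definition above) =====
theorem longest_gap_spec : Claim_equal_longest_gap := by
  unfold Claim_equal_longest_gap Spec_longest_gap
  intro N _
  unfold longest_gap longest_gap_alt
  by_cases hN : N ≤ 0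
  · rw [longestGapLoop]
    simp [show ¬ (N > 0) by omega, hN]
  · have hNpos : 0 < N := by omega
    have hm : 0 < N.toNat := by omega
    have hNe : ((N.toNat : Nat) : Int) = N := by omega
    rw [← hNe, loop_fresh N.toNat hm 0 (by omega)]
    simp only [zero_add]
    have hbx : PySem.Int.bxor ((N.toNat : Nat) : Int) (((N.toNat : Nat) : Int) - 1)
        = ((N.toNat ^^^ (N.toNat - 1) : Nat) : Int) := by
      rw [show ((N.toNat : Nat) : Int) - 1 = ((N.toNat - 1 : Nat) : Int) by omega,
          PySem.Int.bxor_natCast]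
    rw [if_neg (by omega : ¬ ((N.toNat : Nat) : Int) ≤ 0), hbx]
    have hle := bitLength_mask_le N.toNat hm
    split <;> omega
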